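-- pv_equiv track=rewrite | github.com/ralphatobe/cicada-3301 | utils.py | variant_joiner
-- ===== SOURCE A (Python) =====
-- import copy
--
-- def variant_joiner(chars):
--   # generate word variants using - separated options
--   # returns a list of strings
--   word_variants = [[]]
--   for char in chars:
--     if '-' in char:
--       new_variants = copy.deepcopy(word_variants)
--       char_1, char_2 = char.split('-')
--       for word_variant in word_variants:
--         word_variant.append(char_1)
--       for word_variant in new_variants:
--         word_variant.append(char_2)
--       word_variants.extend(new_variants)
--     else:
--       for word_variant in word_variants:
--         word_variant.append(char)
--   for word_variant in word_variants:
--     yield ''.join(word_variant)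
-- ===== SOURCE B (Python) =====
-- import itertools
--
-- def variant_joiner(chars):
--   # generate word variants using - separated options
--   # build one options list, then take a cartesian product over it
--   options = []
--   for char in chars:
--     if '-' in char:
--       char_1, char_2 = char.split('-')
--       options.append([char_1, char_2])
--     else:
--       options.append([char])
--   for combo in itertools.product(*reversed(options)):
--     yield ''.join(reversed(combo))
-- ===== Notes on version B (the rewrite author's own statement) =====
-- stated objective: idiomatic
-- what changed: B replaces A's incremental deepcopy-and-extend growth of partial variant lists by first collecting a per-character options list and then emitting one cartesian product (itertools.product over the reversed options, joining each reversed combo), preserving A's little-endian output order.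
import Mathlib
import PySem

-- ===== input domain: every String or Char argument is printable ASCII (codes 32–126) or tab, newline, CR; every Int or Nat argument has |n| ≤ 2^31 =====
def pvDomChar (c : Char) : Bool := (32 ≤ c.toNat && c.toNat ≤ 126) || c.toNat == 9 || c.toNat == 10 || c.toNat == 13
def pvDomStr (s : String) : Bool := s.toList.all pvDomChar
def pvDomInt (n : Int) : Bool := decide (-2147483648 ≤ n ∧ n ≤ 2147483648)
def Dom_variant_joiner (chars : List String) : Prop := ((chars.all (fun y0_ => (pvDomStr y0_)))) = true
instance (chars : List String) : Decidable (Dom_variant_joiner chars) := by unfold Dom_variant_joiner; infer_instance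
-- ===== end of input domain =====

-- B builds a per-character options list once and emits a single cartesian product (reversed, to keep
-- A's little-endian order) instead of A's deepcopy-and-extend growth of partial variant lists. Both
-- programs are generators; equivalence is about the yielded sequence, read as a list.

-- ===== PORT A =====
-- the '| _' arm totalizes the two-target unpacking 'char_1, char_2 = char.split('-')',
-- which raises ValueError in Python; Pre_ excludes those inputs
def variant_joiner (chars : List String) : List String :=
  let word_variants :=
    chars.foldl (fun word_variants char =>
      if PySem.Str.isIn "-" char then
        let new_variants := word_variants
        match PySem.Str.split? char "-" with
        | some [char_1, char_2] =>
            (word_variants.map (fun wv => wv ++ [char_1])) ++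
              (new_variants.map (fun wv => wv ++ [char_2]))
        | _ => []
      else
        word_variants.map (fun wv => wv ++ [char])) [[]]
  word_variants.map (fun wv => PySem.Str.join "" wv)

-- ===== PORT B =====
-- itertools.product(*opts), big-endian (last option varies fastest)
def pvProduct (opts : List (List String)) : List (List String) :=
  match opts with
  | [] => [[]]
  | o :: rest => o.flatMap (fun v => (pvProduct rest).map (fun c => v :: c))

def variant_joiner_alt (chars : List String) : List String :=
  let options :=
    chars.foldl (fun options char =>
      if PySem.Str.isIn "-" char then
        -- 'char_1, char_2 = char.split('-'); options.append([char_1, char_2])': the split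
        -- result IS the appended pair; a length other than 2 is the ValueError of the
        -- two-target unpacking, totalized as [] and excluded by Pre_ ("-" is nonempty, so
        -- split? is never none)
        let ps := (PySem.Str.split? char "-").getD []
        if ps.length == 2 then options ++ [ps] else []
      else
        options ++ [[char]]) []
  (pvProduct options.reverse).map (fun combo => PySem.Str.join "" combo.reverse)

-- ===== PRECONDITION & SPEC =====
-- Pre_ excludes inputs containing a string with two or more '-' characters: there
-- 'char_1, char_2 = char.split('-')' raises ValueError in A (and in B alike).
def Pre_variant_joiner (chars : List String) : Prop :=
  ∀ c ∈ chars, c.toList.count '-' ≤ 1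
instance (chars : List String) : Decidable (Pre_variant_joiner chars) := by
  unfold Pre_variant_joiner; infer_instance

def pvWitness_variant_joiner : List String := ["a-b", "c", "d-e"]

def Spec_variant_joiner (chars : List String) (out : List String) : Prop := out = variant_joiner_alt chars
instance (chars : List String) (out : List String) : Decidable (Spec_variant_joiner chars out) := by unfold Spec_variant_joiner; infer_instance

-- ===== CLAIM (what is proved, stated in full; the proofs are below) =====
def Claim_equal_variant_joiner : Prop := ∀ (chars : List String), Dom_variant_joiner chars → Pre_variant_joiner chars → Spec_variant_joiner chars (variant_joiner chars)

-- ===== LEMMAS AND PROOFS =====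

-- splitOn with the singleton separator "-" cuts a string into (count of '-') + 1 pieces
theorem splitOn_go_dash_length (l : List Char) :
    ∀ fuel, l.length ≤ fuel → ∀ cur acc,
      (PySem.Chars.splitOn.go ['-'] fuel l cur acc).length = acc.length + 1 + l.count '-' := by
  induction l with
  | nil =>
      intro fuel _ cur acc
      cases fuel <;> simp [PySem.Chars.splitOn.go]
  | cons c rest ih =>
      intro fuel hf cur acc
      cases fuel with
      | zero => simp at hf
      | succ f =>
        by_cases hc : c = '-'
        · subst hc
          have hpref : List.isPrefixOf ['-'] ('-' :: rest) = true := by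
            simp [List.isPrefixOf]
          simp only [PySem.Chars.splitOn.go, hpref, if_true, List.length_cons,
            List.length_nil, List.drop_succ_cons, List.drop_zero]
          rw [ih f (by simpa using hf)]
          simp
          omega
        · have hpref : List.isPrefixOf ['-'] (c :: rest) = false := by
            simp [List.isPrefixOf]
            exact fun h => hc h.symm
          simp only [PySem.Chars.splitOn.go, hpref, Bool.false_eq_true, if_false]
          rw [ih f (by simpa using hf)]
          simp [hc]

theorem splitOn_dash_pair (s : String) (hcount : s.toList.count '-' ≤ 1)
    (hin : PySem.Str.isIn "-" s = true) :
    ∃ a b, PySem.Str.split? s "-" = some [a, b] := by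
  have hmem : '-' ∈ s.toList := by
    obtain ⟨pre, suf, h⟩ := (PySem.Str.isIn_iff_infix "-" s).mp hin
    have hx : ('-' : Char) ∈ "-".toList := by decide
    rw [← h]
    simp only [List.mem_append]
    tauto
  have h1 : 1 ≤ s.toList.count '-' := List.one_le_count_iff.mpr hmem
  have hc : s.toList.count '-' = 1 := le_antisymm hcount h1
  have hlen : (PySem.Chars.splitOn s.toList ['-']).length = 2 := by
    unfold PySem.Chars.splitOn
    rw [splitOn_go_dash_length s.toList (s.toList.length + 1) (by omega) [] []]
    simp [hc]
  have heq : PySem.Str.split? s "-" = some ((PySem.Chars.splitOn s.toList ['-']).map String.ofList) := by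
    simp [PySem.Str.split?, PySem.Chars.split?]
  rw [heq]
  rcases hsp : PySem.Chars.splitOn s.toList ['-'] with _ | ⟨a, _ | ⟨b, _ | _⟩⟩ <;>
    simp [hsp] at hlen ⊢

-- A's in-place growth step applied to the reversed product of the options so far
-- equals the reversed product of the extended options.
theorem product_append_single (opts : List (List String)) (o : List String) :
    (pvProduct (opts ++ [o]).reverse).map List.reverse
      = o.flatMap (fun v => ((pvProduct opts.reverse).map List.reverse).map (fun wv => wv ++ [v])) := by
  rw [List.reverse_append]
  simp only [List.reverse_cons, List.reverse_nil, List.nil_append, List.singleton_append]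
  show (List.flatMap _ o).map List.reverse = _
  rw [List.map_flatMap]
  congr 1
  funext v
  simp [List.map_map, Function.comp_def]

theorem main_fold (chars : List String) (h : ∀ c ∈ chars, c.toList.count '-' ≤ 1) :
    ∀ opts : List (List String),
      chars.foldl (fun word_variants char =>
        if PySem.Str.isIn "-" char then
          match PySem.Str.split? char "-" with
          | some [char_1, char_2] =>
              (word_variants.map (fun wv => wv ++ [char_1])) ++
                (word_variants.map (fun wv => wv ++ [char_2]))
          | _ => []
        else
          word_variants.map (fun wv => wv ++ [char])) ((pvProduct opts.reverse).map List.reverse)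
      = (pvProduct (chars.foldl (fun options char =>
          if PySem.Str.isIn "-" char then
            let ps := (PySem.Str.split? char "-").getD []
            if ps.length == 2 then options ++ [ps] else []
          else
            options ++ [[char]]) opts).reverse).map List.reverse := by
  induction chars with
  | nil => intro opts; rfl
  | cons c cs ih =>
      intro opts
      simp only [List.foldl_cons]
      by_cases hin : PySem.Str.isIn "-" c = true
      · obtain ⟨a, b, hsp⟩ := splitOn_dash_pair c (h c (by simp)) hin
        rw [hin, hsp]
        simp only [if_true]
        have hstep := product_append_single opts [a, b]
        simp only [List.flatMap_cons, List.flatMap_nil, List.append_nil] at hstep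
        rw [← hstep]
        exact ih (fun x hx => h x (by simp [hx]))  (opts ++ [[a, b]])
      · simp only [hin, Bool.false_eq_true, if_false]
        have hstep := product_append_single opts [c]
        simp only [List.flatMap_cons, List.flatMap_nil, List.append_nil] at hstep
        rw [← hstep]
        exact ih (fun x hx => h x (by simp [hx])) (opts ++ [[c]])

-- ===== VERDICT (by name: the statement is the Claim_ definition above) =====
theorem variant_joiner_spec : Claim_equal_variant_joiner := by
  intro chars _ hpre
  unfold Spec_variant_joiner variant_joiner variant_joiner_alt
  have h := main_fold chars hpre []
  simp only [List.reverse_nil] at h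
  have hinit : (pvProduct ([] : List (List String))).map List.reverse = [[]] := rfl
  rw [hinit] at h
  rw [h, List.map_map]
  congr 1
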